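-- pv_equiv track=rewrite | github.com/UlrichBerntien/Codewars-Katas | 8_kyu/A_Letters_Best_Friend.py | best_friend
-- ===== SOURCE A (Python) =====
-- def best_friend(txt: str, a :str, b :str) -> bool:
--     """
--     Returns True if in txt after char a is the char b
--     """
--     snd = False # second character must follow
--     for c in txt:
--         if snd:
--             if b != c: return False
--             snd = False
--         # no elfi because the second char could be also the first char if a==b
--         if a == c:
--             snd = True
--     return not snd
-- ===== SOURCE B (Python) =====
-- def best_friend(txt: str, a: str, b: str) -> bool:
--     """
--     Returns True if in txt after char a is the char b
--     """
--     return all(i + 1 < len(txt) and txt[i + 1] == b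
--                for i in range(len(txt)) if txt[i] == a)
-- ===== Notes on version B (the rewrite author's own statement) =====
-- stated objective: simpler
-- what changed: Replaces the stateful flag loop with early return by a per-index lookahead: every position holding a must have b as its immediate successor, checked with all() over indices.
import Mathlib
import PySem

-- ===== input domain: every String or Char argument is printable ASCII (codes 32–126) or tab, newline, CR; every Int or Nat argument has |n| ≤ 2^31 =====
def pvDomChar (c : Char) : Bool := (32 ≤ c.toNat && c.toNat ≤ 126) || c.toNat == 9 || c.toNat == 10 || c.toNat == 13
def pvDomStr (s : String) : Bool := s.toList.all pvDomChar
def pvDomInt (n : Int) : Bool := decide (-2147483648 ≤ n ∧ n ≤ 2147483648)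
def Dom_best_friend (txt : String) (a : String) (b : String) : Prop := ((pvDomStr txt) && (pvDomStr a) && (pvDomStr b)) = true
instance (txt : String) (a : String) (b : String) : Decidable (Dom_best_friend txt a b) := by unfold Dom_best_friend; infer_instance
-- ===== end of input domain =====

-- B replaces A's carried boolean flag and early return with a per-index lookahead
-- (every occurrence of a must be immediately followed by b); objective: simpler.

-- ===== PORT A =====
-- state: (early-returned value if any, snd flag); early `return False` is modelled
-- by fixing the state once the first component is `some _`.
def pvStepA (a b : String) (st : Option Bool × Bool) (c : Char) : Option Bool × Bool :=
  match st with
  | (some r, s) => (some r, s)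
  | (none, snd) =>
    if snd ∧ b.toList ≠ [c] then (some false, snd)
    else
      let snd1 := if snd then false else snd
      let snd2 := if a.toList = [c] then true else snd1
      (none, snd2)

def best_friend (txt : String) (a : String) (b : String) : Bool :=
  match txt.toList.foldl (pvStepA a b) (none, false) with
  | (some r, _) => r
  | (none, snd) => !snd

-- ===== PORT B =====
-- `all(i + 1 < len(txt) and txt[i+1] == b for i in range(len(txt)) if txt[i] == a)`
def pvCheckB (cs : List Char) (a b : String) (i : Nat) : Bool :=
  if a.toList = [cs.getD i ' '] then
    decide (i + 1 < cs.length) && (b.toList = [cs.getD (i + 1) ' '])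
  else true

def best_friend_alt (txt : String) (a : String) (b : String) : Bool :=
  let cs := txt.toList
  (List.range cs.length).all (pvCheckB cs a b)

-- ===== PRECONDITION & SPEC =====
def Spec_best_friend (txt : String) (a : String) (b : String) (out : Bool) : Prop := out = best_friend_alt txt a b
instance (txt : String) (a : String) (b : String) (out : Bool) : Decidable (Spec_best_friend txt a b out) := by unfold Spec_best_friend; infer_instance

-- ===== CLAIM (what is proved, stated in full; the proofs are below) =====
def Claim_equal_best_friend : Prop := ∀ (txt : String) (a : String) (b : String), Dom_best_friend txt a b → Spec_best_friend txt a b (best_friend txt a b)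

-- ===== LEMMAS AND PROOFS =====

-- recursive characterisation of A's loop
def pvFA (a b : String) : List Char → Bool → Bool
  | [], s => !s
  | c :: cs, s => if s ∧ b.toList ≠ [c] then false else pvFA a b cs (a.toList = [c])

theorem pv_foldl_some (a b : String) (cs : List Char) (r : Bool) (s : Bool) :
    cs.foldl (pvStepA a b) (some r, s) = (some r, s) := by
  induction cs with
  | nil => rfl
  | cons c cs ih => simpa [pvStepA] using ih

theorem pvA_eq_fA (a b : String) (cs : List Char) (s : Bool) :
    (match cs.foldl (pvStepA a b) (none, s) with
     | (some r, _) => r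
     | (none, snd) => !snd) = pvFA a b cs s := by
  induction cs generalizing s with
  | nil => rfl
  | cons c cs ih =>
    by_cases h : s ∧ b.toList ≠ [c]
    · simp [pvStepA, pvFA, h, pv_foldl_some]
    · have : pvStepA a b (none, s) c
          = (none, if a.toList = [c] then true else if s then false else s) := by
        simp [pvStepA, h]
      rw [List.foldl_cons, this, ih]
      have hx : (if a.toList = [c] then true else if s then false else s)
          = (a.toList = [c] : Bool) := by
        by_cases ha : a.toList = [c] <;> cases s <;> simp [ha]
      rw [hx]
      simp [pvFA, h]

-- B's indexed all, one step at a time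
theorem pvCheckB_shift (c : Char) (cs : List Char) (a b : String) (i : Nat) :
    pvCheckB (c :: cs) a b (i + 1) = pvCheckB cs a b i := by
  simp [pvCheckB]

theorem pvB_cons (c : Char) (cs : List Char) (a b : String) :
    (List.range (c :: cs).length).all (pvCheckB (c :: cs) a b)
      = (pvCheckB (c :: cs) a b 0 && (List.range cs.length).all (pvCheckB cs a b)) := by
  have : (c :: cs).length = cs.length + 1 := rfl
  rw [this, List.range_succ_eq_map]
  have hfun : (pvCheckB (c :: cs) a b ∘ Nat.succ) = pvCheckB cs a b :=
    funext fun i => pvCheckB_shift c cs a b i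
  simp only [List.all_cons, List.all_map, hfun]

-- fA with flag set = (head is b) and fA with flag clear
theorem pvFA_true (a b : String) (cs : List Char) :
    pvFA a b cs true
      = ((match cs with
          | [] => false
          | c :: _ => (b.toList = [c] : Bool)) && pvFA a b cs false) := by
  cases cs with
  | nil => rfl
  | cons c cs =>
    simp only [pvFA]
    by_cases hb : b.toList = [c] <;> simp [hb]

theorem pvFA_eq_B (a b : String) (cs : List Char) :
    pvFA a b cs false = (List.range cs.length).all (pvCheckB cs a b) := by
  induction cs with
  | nil => rfl
  | cons c cs ih =>
    rw [pvB_cons]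
    have hstep : pvFA a b (c :: cs) false = pvFA a b cs (a.toList = [c]) := by
      simp [pvFA]
    by_cases ha : a.toList = [c]
    · rw [hstep]
      simp only [ha, decide_true]
      rw [pvFA_true, ih]
      cases cs with
      | nil => simp [pvCheckB, ha]
      | cons c2 cs2 =>
        simp [pvCheckB, ha]
    · rw [hstep]
      simp only [ha, decide_false]
      rw [ih]
      have : pvCheckB (c :: cs) a b 0 = true := by
        simp [pvCheckB, ha]
      simp [this]

-- ===== VERDICT (by name: the statement is the Claim_ definition above) =====
theorem best_friend_spec : Claim_equal_best_friend := by
  intro txt a b _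
  unfold Spec_best_friend best_friend best_friend_alt
  rw [pvA_eq_fA, pvFA_eq_B]
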